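-- pv_equiv track=rewrite | github.com/tokotmg/GOA-homework | day 89/classwork/day 89.py | solution
-- ===== SOURCE A (Python) =====
-- import string
--
-- def solution(s):
--     alphabet = string.ascii_lowercase
--     result = []
--     i = 0
--     while i < len(s):
--         j = i
--         while j + 1 < len(s) and (ord(s[j+1]) - ord(s[j]) == 1):
--             j += 1
--         if j > i:
--             slice_to_reverse = s[i:j+1]
--             result.append(slice_to_reverse[::-1])
--             i = j + 1
--         else:
--             result.append(s[i])
--             i += 1
--     return "".join(result)
-- ===== SOURCE B (Python) =====
-- def solution(s):
--     # Single forward pass with a run accumulator: the current ascending run is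
--     # kept already reversed (new chars are prepended), so flushing is a plain append.
--     parts = []
--     run = ""
--     for ch in s:
--         if run and ord(ch) - ord(run[0]) == 1:
--             run = ch + run
--         else:
--             parts.append(run)
--             run = ch
--     parts.append(run)
--     return "".join(parts)
-- ===== Notes on version B (the rewrite author's own statement) =====
-- stated objective: simpler
-- what changed: Replaced the nested index-scanning while loops (inner scan to find each run's end, then slicing and index jumps) by a single forward pass over the characters with a run accumulator kept pre-reversed and flushed whenever the ascending chain breaks; avoiding per-character indexing/slicing gives a constant-factor speedup.
import Mathlib
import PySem

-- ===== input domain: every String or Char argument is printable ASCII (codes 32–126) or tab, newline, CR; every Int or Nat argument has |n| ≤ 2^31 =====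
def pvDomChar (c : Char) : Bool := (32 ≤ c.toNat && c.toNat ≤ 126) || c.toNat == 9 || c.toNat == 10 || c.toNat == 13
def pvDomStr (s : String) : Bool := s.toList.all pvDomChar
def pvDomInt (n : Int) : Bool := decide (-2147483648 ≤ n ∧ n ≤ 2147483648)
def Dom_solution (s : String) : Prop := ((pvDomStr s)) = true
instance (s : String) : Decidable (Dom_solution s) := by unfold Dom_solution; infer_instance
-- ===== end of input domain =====

-- B replaces A's nested index-scanning loops by one forward pass with a run accumulator (simpler decomposition, same cost).

-- ===== PORT A =====
-- inner while: advance j while the next character is the ascending successor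
def solScan (l : List Char) (j : Nat) : Nat :=
  if h : j + 1 < l.length ∧ ((l[j+1]!.toNat : Int) - (l[j]!.toNat : Int) = 1) then
    solScan l (j + 1)
  else j
termination_by l.length - j
decreasing_by omega

-- outer while over i; pieces collected as char lists ("".join ported as Chars.join [] at the end)
def solGo (l : List Char) (i : Nat) : List (List Char) :=
  if h : i < l.length then
    let j := solScan l i
    if hj : j > i then
      (PySem.List.slice l (some (i : Int)) (some ((j : Int) + 1))).reverse :: solGo l (j + 1)
    else
      [l[i]!] :: solGo l (i + 1)
  else []
termination_by l.length - i
decreasing_by · omega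
              · omega

def solution (s : String) : String :=
  String.ofList (PySem.Chars.join [] (solGo s.toList 0))

-- ===== PORT B =====
-- one step of B's loop body: extend the (pre-reversed) run or flush it
def altStep (st : List (List Char) × List Char) (ch : Char) : List (List Char) × List Char :=
  match st with
  | (parts, run) =>
    if run ≠ [] ∧ ((ch.toNat : Int) - (run.headI.toNat : Int) = 1) then
      (parts, ch :: run)
    else
      (parts ++ [run], [ch])

def solution_alt (s : String) : String :=
  let st := s.toList.foldl altStep ([], [])
  String.ofList (PySem.Chars.join [] (st.1 ++ [st.2]))

-- ===== PRECONDITION & SPEC =====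
def Spec_solution (s : String) (out : String) : Prop := out = solution_alt s
instance (s : String) (out : String) : Decidable (Spec_solution s out) := by unfold Spec_solution; infer_instance

-- ===== CLAIM (what is proved, stated in full; the proofs are below) =====
def Claim_equal_solution : Prop := ∀ (s : String), Dom_solution s → Spec_solution s (solution s)

-- ===== LEMMAS AND PROOFS =====

-- take the maximal ascending run starting at c, returning (run, rest)
def takeRun (c : Char) : List Char → List Char × List Char
  | [] => ([c], [])
  | d :: rest =>
    if ((d.toNat : Int) - (c.toNat : Int) = 1) then
      let p := takeRun d rest
      (c :: p.1, p.2)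
    else ([c], d :: rest)

lemma takeRun_snd_length (c : Char) (l : List Char) : (takeRun c l).2.length ≤ l.length := by
  induction l generalizing c with
  | nil => simp [takeRun]
  | cons d rest ih =>
    simp only [takeRun]
    split
    · exact le_trans (ih d) (by simp)
    · simp

-- the common specification: split into maximal ascending runs, each reversed
def piecesOf : List Char → List (List Char)
  | [] => []
  | c :: rest => (takeRun c rest).1.reverse :: piecesOf (takeRun c rest).2
termination_by l => l.length
decreasing_by exact Nat.lt_succ_of_le (takeRun_snd_length _ _)

lemma scan_ge_aux (l : List Char) : ∀ n j, l.length - j ≤ n → j ≤ solScan l j := by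
  intro n
  induction n with
  | zero =>
    intro j h
    rw [solScan]
    have : ¬ (j + 1 < l.length ∧ ((l[j+1]!.toNat : Int) - (l[j]!.toNat : Int) = 1)) := by
      intro hc; omega
    rw [dif_neg this]
  | succ n ih =>
    intro j h
    rw [solScan]
    by_cases hc : j + 1 < l.length ∧ ((l[j+1]!.toNat : Int) - (l[j]!.toNat : Int) = 1)
    · rw [dif_pos hc]
      have := ih (j + 1) (by omega)
      omega
    · rw [dif_neg hc]

lemma scan_ge (l : List Char) (j : Nat) : j ≤ solScan l j :=
  scan_ge_aux l (l.length - j) j le_rfl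

lemma scan_takeRun (l : List Char) : ∀ n i, l.length - i ≤ n → i < l.length →
    takeRun l[i]! (l.drop (i + 1)) =
      ((l.drop i).take (solScan l i + 1 - i), l.drop (solScan l i + 1)) := by
  intro n
  induction n with
  | zero => intro i h hi; omega
  | succ n ih =>
    intro i h hi
    by_cases hc : i + 1 < l.length ∧ ((l[i+1]!.toNat : Int) - (l[i]!.toNat : Int) = 1)
    · have hscan : solScan l i = solScan l (i + 1) := by rw [solScan]; exact dif_pos hc
      have hdrop : l.drop (i + 1) = l[i+1]! :: l.drop (i + 2) := by
        rw [getElem!_pos l (i+1) hc.1]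
        exact List.drop_eq_getElem_cons hc.1
      have hge : i + 1 ≤ solScan l (i + 1) := scan_ge l (i + 1)
      have := ih (i + 1) (by omega) hc.1
      rw [hdrop, takeRun]
      simp only [hc.2, if_true, this, hscan]
      rw [Prod.mk.injEq]
      constructor
      · have hdrop2 : l.drop i = l[i]! :: l.drop (i + 1) := by
          rw [getElem!_pos l i hi]
          exact List.drop_eq_getElem_cons hi
        rw [hdrop2]
        have : solScan l (i + 1) + 1 - i = (solScan l (i + 1) + 1 - (i + 1)) + 1 := by omega
        rw [this, List.take_succ_cons]
      · rfl
    · have hscan : solScan l i = i := by rw [solScan]; exact dif_neg hc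
      rw [hscan]
      have hdropi : l.drop i = l[i]! :: l.drop (i + 1) := by
        rw [getElem!_pos l i hi]
        exact List.drop_eq_getElem_cons hi
      by_cases h1 : i + 1 < l.length
      · have hne : ¬ ((l[i+1]!.toNat : Int) - (l[i]!.toNat : Int) = 1) := by
          intro hd; exact hc ⟨h1, hd⟩
        have hdrop : l.drop (i + 1) = l[i+1]! :: l.drop (i + 2) := by
          rw [getElem!_pos l (i+1) h1]
          exact List.drop_eq_getElem_cons h1
        rw [hdrop, takeRun]
        simp only [hne, if_false]
        rw [hdropi, hdrop]
        simp
      · have : l.drop (i + 1) = [] := List.drop_eq_nil_of_le (by omega)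
        rw [this, takeRun, hdropi, this]
        simp

lemma go_eq (l : List Char) : ∀ n i, l.length - i ≤ n → solGo l i = piecesOf (l.drop i) := by
  intro n
  induction n with
  | zero =>
    intro i h
    have : ¬ i < l.length := by omega
    rw [solGo]
    simp only [this, dite_false]
    rw [List.drop_eq_nil_of_le (by omega), piecesOf]
  | succ n ih =>
    intro i h
    by_cases hi : i < l.length
    · have hdropi : l.drop i = l[i]! :: l.drop (i + 1) := by
        rw [getElem!_pos l i hi]
        exact List.drop_eq_getElem_cons hi
      have hst := scan_takeRun l (l.length - i) i (le_refl _) hi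
      have hge := scan_ge l i
      rw [solGo]
      simp only [hi, dite_true]
      rw [hdropi, piecesOf, hst]
      by_cases hj : solScan l i > i
      · simp only [hj, dite_true]
        congr 1
        · have hcast : ((solScan l i : Int) + 1) = ((solScan l i + 1 : Nat) : Int) := by
            push_cast; ring
          rw [hcast, PySem.List.slice_natCast]
        · rw [ih (solScan l i + 1) (by omega)]
      · have hji : solScan l i = i := by omega
        simp only [hj, dite_false]
        rw [hji]
        congr 1
        · simp [hdropi]
        · rw [ih (i + 1) (by omega)]
    · rw [solGo]
      simp only [hi, dite_false]
      rw [List.drop_eq_nil_of_le (by omega), piecesOf]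

-- B's loop as a recursive splitter (run kept pre-reversed)
def bspec (run : List Char) : List Char → List (List Char)
  | [] => [run]
  | ch :: rest =>
    if run ≠ [] ∧ ((ch.toNat : Int) - (run.headI.toNat : Int) = 1) then
      bspec (ch :: run) rest
    else run :: bspec [ch] rest

lemma foldl_altStep (cs : List Char) : ∀ parts run,
    (cs.foldl altStep (parts, run)).1 ++ [(cs.foldl altStep (parts, run)).2] =
      parts ++ bspec run cs := by
  induction cs with
  | nil => intro parts run; simp [bspec]
  | cons ch rest ih =>
    intro parts run
    simp only [List.foldl_cons, altStep, bspec]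
    split
    · rw [ih]
    · rw [ih]; simp

lemma bspec_cons (rest : List Char) : ∀ (c : Char) (pre : List Char),
    bspec (c :: pre) rest =
      ((takeRun c rest).1.reverse ++ pre) :: piecesOf (takeRun c rest).2 := by
  induction rest with
  | nil => intro c pre; simp [bspec, takeRun, piecesOf]
  | cons d rest' ih =>
    intro c pre
    by_cases hd : ((d.toNat : Int) - (c.toNat : Int) = 1)
    · rw [bspec]
      have hcond : (c :: pre ≠ [] ∧ ((d.toNat : Int) - ((c :: pre).headI.toNat : Int) = 1)) := by
        simp [hd]
      simp only [hcond]
      rw [ih d (c :: pre), takeRun]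
      simp [hd]
    · rw [bspec]
      have hcond : ¬ (c :: pre ≠ [] ∧ ((d.toNat : Int) - ((c :: pre).headI.toNat : Int) = 1)) := by
        simp [hd]
      simp only [hcond, if_false]
      rw [takeRun]
      simp only [hd, if_false]
      rw [ih d [], piecesOf]
      simp

lemma bspec_nil_run (cs : List Char) : bspec [] cs = [] :: piecesOf cs := by
  cases cs with
  | nil => simp [bspec, piecesOf]
  | cons c rest =>
    rw [bspec]
    simp only [ne_eq, not_true_eq_false, false_and, if_false]
    rw [bspec_cons, piecesOf]
    simp

-- ===== VERDICT (by name: the statement is the Claim_ definition above) =====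
theorem solution_spec : Claim_equal_solution := by
  intro s _
  unfold Spec_solution solution solution_alt
  rw [go_eq s.toList s.toList.length 0 (by omega), List.drop_zero]
  show String.ofList (PySem.Chars.join [] (piecesOf s.toList)) =
    String.ofList (PySem.Chars.join []
      ((s.toList.foldl altStep ([], [])).1 ++ [(s.toList.foldl altStep ([], [])).2]))
  rw [foldl_altStep s.toList [] [], bspec_nil_run]
  cases piecesOf s.toList <;> simp [PySem.Chars.join, List.intercalate]
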